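-- pv_equiv track=rewrite | github.com/posl/comment_recommendation | script/mod_gen/5_time/en/261_D/9.py | get_max_coin
-- ===== SOURCE A (Python) =====
-- def get_max_coin(N, M, X, C, Y):
--     max_coin = 0
--     for i in range(N):
--         coin = X[i]
--         for j in range(M):
--             if i + 1 == C[j]:
--                 coin += Y[j]
--         if max_coin < coin:
--             max_coin = coin
--     return max_coin
-- ===== SOURCE B (Python) =====
-- def get_max_coin(N, M, X, C, Y):
--     bonus = {}
--     for j in range(M):
--         bonus[C[j]] = bonus.get(C[j], 0) + Y[j]
--     max_coin = 0
--     for i in range(N):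
--         coin = X[i] + bonus.get(i + 1, 0)
--         if max_coin < coin:
--             max_coin = coin
--     return max_coin
-- ===== Notes on version B (the rewrite author's own statement) =====
-- stated objective: faster
-- what changed: Replaces the inner scan over all M coupons for every coin with a dict that sums Y[j] by C[j] built once, so each coin does a single O(1) lookup.
-- outside the precondition, e.g. on get_max_coin(-3, 4, [7, 1, -5478, 3, -1], [], [-3, 0]): A returns 0, B raises IndexError; on get_max_coin(1, 2, [5], [9, 9], []): A returns 5, B raises IndexError
import Mathlib
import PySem

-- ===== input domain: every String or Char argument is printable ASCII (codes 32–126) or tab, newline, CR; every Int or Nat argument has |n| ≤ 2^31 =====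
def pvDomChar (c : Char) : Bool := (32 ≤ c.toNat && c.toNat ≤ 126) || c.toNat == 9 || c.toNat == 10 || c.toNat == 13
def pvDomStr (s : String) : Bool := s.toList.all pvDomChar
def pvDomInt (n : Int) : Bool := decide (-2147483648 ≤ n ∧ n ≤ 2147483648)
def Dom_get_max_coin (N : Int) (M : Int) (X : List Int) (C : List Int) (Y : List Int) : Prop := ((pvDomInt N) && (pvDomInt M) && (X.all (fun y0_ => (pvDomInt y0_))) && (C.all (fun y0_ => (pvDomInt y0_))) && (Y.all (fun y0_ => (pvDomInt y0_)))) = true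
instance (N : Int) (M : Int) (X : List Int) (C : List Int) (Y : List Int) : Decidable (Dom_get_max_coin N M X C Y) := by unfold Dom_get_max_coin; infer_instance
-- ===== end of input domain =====

-- B replaces A's inner scan over all M coupons per coin with a dict summing Y[j] by C[j] built once (faster).


-- ===== PORT A =====
def get_max_coin (N : Int) (M : Int) (X : List Int) (C : List Int) (Y : List Int) : Int :=
  (PySem.List.pyRange 0 N 1).foldl (fun max_coin i =>
    let coin := (PySem.List.pyRange 0 M 1).foldl (fun coin j =>
      if i + 1 = PySem.List.pyGetD C j 0 then coin + PySem.List.pyGetD Y j 0 else coin)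
      (PySem.List.pyGetD X i 0)
    if max_coin < coin then coin else max_coin) 0

-- ===== PORT B =====
def get_max_coin_alt (N : Int) (M : Int) (X : List Int) (C : List Int) (Y : List Int) : Int :=
  let bonus : PySem.Dict Int Int := (PySem.List.pyRange 0 M 1).foldl (fun d j =>
    d.insert (PySem.List.pyGetD C j 0)
      (d.getD (PySem.List.pyGetD C j 0) 0 + PySem.List.pyGetD Y j 0)) PySem.Dict.empty
  (PySem.List.pyRange 0 N 1).foldl (fun max_coin i =>
    let coin := PySem.List.pyGetD X i 0 + bonus.getD (i + 1) 0
    if max_coin < coin then coin else max_coin) 0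

-- ===== PRECONDITION & SPEC =====
-- Pre_ bounds N by len(X) and M by len(C) and len(Y): outside it A raises IndexError except where its lazy
-- evaluation never reaches the out-of-range access (N <= 0 skips both loops; Y[j] is read only when C[j] matches),
-- while B, which scans all M coupon pairs up front, raises IndexError on those inputs.
def Pre_get_max_coin (N : Int) (M : Int) (X : List Int) (C : List Int) (Y : List Int) : Prop :=
  N ≤ (X.length : Int) ∧ M ≤ (C.length : Int) ∧ M ≤ (Y.length : Int)
instance (N : Int) (M : Int) (X : List Int) (C : List Int) (Y : List Int) : Decidable (Pre_get_max_coin N M X C Y) := by unfold Pre_get_max_coin; infer_instance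
def pvWitness_get_max_coin : Int × Int × List Int × List Int × List Int := (3, 2, [5, -1, 2], [1, 3], [4, 7])
def Spec_get_max_coin (N : Int) (M : Int) (X : List Int) (C : List Int) (Y : List Int) (out : Int) : Prop := out = get_max_coin_alt N M X C Y
instance (N : Int) (M : Int) (X : List Int) (C : List Int) (Y : List Int) (out : Int) : Decidable (Spec_get_max_coin N M X C Y out) := by unfold Spec_get_max_coin; infer_instance

-- ===== CLAIM (what is proved, stated in full; the proofs are below) =====
def Claim_equal_get_max_coin : Prop := ∀ (N : Int) (M : Int) (X : List Int) (C : List Int) (Y : List Int), Dom_get_max_coin N M X C Y → Pre_get_max_coin N M X C Y → Spec_get_max_coin N M X C Y (get_max_coin N M X C Y)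

-- ===== LEMMAS AND PROOFS =====

/-- A's inner accumulation over any index list equals the starting value plus the
    increase of the grouping dict's entry for `key` over the same index list. -/
theorem inner_sum_eq_dict (c y : Int → Int) :
    ∀ (L : List Int) (key init : Int) (d : PySem.Dict Int Int),
      L.foldl (fun coin j => if key = c j then coin + y j else coin) init
      = init + ((L.foldl (fun d j => d.insert (c j) (d.getD (c j) 0 + y j)) d).getD key 0
                 - d.getD key 0) := by
  intro L
  induction L with
  | nil => intro key init d; simp
  | cons j rest ih =>
    intro key init d
    simp only [List.foldl_cons]
    rw [ih key (if key = c j then init + y j else init)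
          (d.insert (c j) (d.getD (c j) 0 + y j)),
        PySem.Dict.getD_insert]
    by_cases h : key = c j
    · subst h
      rw [if_pos rfl, if_pos rfl]
      ring
    · rw [if_neg h, if_neg h]

theorem get_max_coin_spec : Claim_equal_get_max_coin := by
  intro N M X C Y _ _
  unfold Spec_get_max_coin get_max_coin get_max_coin_alt
  have h : ∀ i : Int,
      (PySem.List.pyRange 0 M 1).foldl (fun coin j =>
        if i + 1 = PySem.List.pyGetD C j 0 then coin + PySem.List.pyGetD Y j 0 else coin)
        (PySem.List.pyGetD X i 0)
      = PySem.List.pyGetD X i 0 +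
          ((PySem.List.pyRange 0 M 1).foldl (fun d j =>
            d.insert (PySem.List.pyGetD C j 0)
              (d.getD (PySem.List.pyGetD C j 0) 0 + PySem.List.pyGetD Y j 0))
            PySem.Dict.empty).getD (i + 1) 0 := by
    intro i
    rw [inner_sum_eq_dict (fun j => PySem.List.pyGetD C j 0) (fun j => PySem.List.pyGetD Y j 0)
          (PySem.List.pyRange 0 M 1) (i + 1) (PySem.List.pyGetD X i 0) PySem.Dict.empty,
        PySem.Dict.getD_empty]
    ring
  simp only [h]
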